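-- pv_equiv track=rewrite | github.com/tahiraziz/PE-Prototype | backend/integration/clinical_mappings.py | match_lab_type
-- ===== SOURCE A (Python) =====
-- from typing import Dict, List, Optional, Tuple
--
-- LAB_LOINC: Dict[str, List[str]] = {
--     "inr": ["6301-6", "34714-6", "46418-0"],
--     "ddimer": ["48066-5", "48065-7", "48067-3", "3246-6", "48058-2"],
--     "troponin": ["6598-7", "10839-9", "49563-0", "89579-7"],
--     "bnp": ["30934-4", "33762-6"],
--     "creatinine": ["2160-0", "38483-4"]
-- }
--
-- def match_lab_type(codes: List[str], display: str) -> Optional[str]: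
--     """
--     Match observation codes/display to a lab type.
--
--     Returns: inr | ddimer | troponin | bnp | creatinine | None
--     """
--     # Try LOINC code match first
--     for lab_type, loinc_codes in LAB_LOINC.items():
--         for code in codes:
--             if code in loinc_codes:
--                 return lab_type
--
--     # Fall back to text matching
--     display_lower = display.lower() if display else ""
--
--     if "inr" in display_lower:
--         return "inr"
--     if "d-dimer" in display_lower or "ddimer" in display_lower or "d dimer" in display_lower:
--         return "ddimer"
--     if "troponin" in display_lower:
--         return "troponin"
--     if "bnp" in display_lower or "natriuretic" in display_lower:
--         return "bnp"
--     if "creatinine" in display_lower: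
--         return "creatinine"
--
--     return None
-- ===== SOURCE B (Python) =====
-- from typing import Dict, List, Optional
--
-- LAB_LOINC: Dict[str, List[str]] = {
--     "inr": ["6301-6", "34714-6", "46418-0"],
--     "ddimer": ["48066-5", "48065-7", "48067-3", "3246-6", "48058-2"],
--     "troponin": ["6598-7", "10839-9", "49563-0", "89579-7"],
--     "bnp": ["30934-4", "33762-6"],
--     "creatinine": ["2160-0", "38483-4"]
-- }
--
-- # Reverse index: LOINC code -> lab type (code lists are disjoint).
-- _CODE_TO_TYPE: Dict[str, str] = {
--     code: lab_type for lab_type, codes in LAB_LOINC.items() for code in codes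
-- }
--
-- # Ordered keyword table mirroring the textual fallback rules.
-- _KEYWORDS = [
--     ("inr", "inr"),
--     ("d-dimer", "ddimer"),
--     ("ddimer", "ddimer"),
--     ("d dimer", "ddimer"),
--     ("troponin", "troponin"),
--     ("bnp", "bnp"),
--     ("natriuretic", "bnp"),
--     ("creatinine", "creatinine"),
-- ]
--
-- def match_lab_type(codes: List[str], display: str) -> Optional[str]:
--     # One pass over the input codes through the reverse index,
--     # then pick the matched lab type of highest declared priority.
--     hits = {_CODE_TO_TYPE[c] for c in codes if c in _CODE_TO_TYPE}
--     for lab_type in LAB_LOINC: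
--         if lab_type in hits:
--             return lab_type
--     # Text fallback, table-driven.
--     text = display.lower() if display else ""
--     for kw, lab_type in _KEYWORDS:
--         if kw in text:
--             return lab_type
--     return None
-- ===== Notes on version B (the rewrite author's own statement) =====
-- stated objective: faster
-- what changed: Replaces A's table-order nested scans (each input code searched in every LOINC list) with a precomputed reverse index (code -> lab type) consumed in one pass over the input codes plus a priority pick, and replaces the text if-chain with an ordered keyword table.
import Mathlib
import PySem

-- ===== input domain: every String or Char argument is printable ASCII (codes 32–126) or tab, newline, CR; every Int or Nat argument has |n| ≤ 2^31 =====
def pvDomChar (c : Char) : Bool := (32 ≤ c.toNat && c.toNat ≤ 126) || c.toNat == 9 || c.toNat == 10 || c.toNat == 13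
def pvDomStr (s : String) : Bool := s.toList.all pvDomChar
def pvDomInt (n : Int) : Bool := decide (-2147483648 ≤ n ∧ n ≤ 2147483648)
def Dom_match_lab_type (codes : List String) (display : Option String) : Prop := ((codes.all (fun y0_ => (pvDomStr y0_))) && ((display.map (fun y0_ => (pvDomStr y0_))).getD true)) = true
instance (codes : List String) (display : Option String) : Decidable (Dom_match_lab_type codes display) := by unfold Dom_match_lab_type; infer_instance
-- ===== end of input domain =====

-- B replaces A's table-order nested scans by a precomputed reverse index (code -> lab type)
-- consumed in one pass over the input codes plus a priority pick, and the text if-chain by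
-- an ordered keyword table (objective: faster by a constant factor, as measured; same return value).

-- ===== PORT A =====
def labLoinc : List (String × List String) :=
  [("inr", ["6301-6", "34714-6", "46418-0"]),
   ("ddimer", ["48066-5", "48065-7", "48067-3", "3246-6", "48058-2"]),
   ("troponin", ["6598-7", "10839-9", "49563-0", "89579-7"]),
   ("bnp", ["30934-4", "33762-6"]),
   ("creatinine", ["2160-0", "38483-4"])]

-- the inner 'for code in codes: if code in loinc_codes: return lab_type' (early exit)
def anyCodeIn (codes : List String) (loincCodes : List String) : Bool :=
  match codes with
  | [] => false
  | c :: rest => if loincCodes.contains c then true else anyCodeIn rest loincCodes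

-- the outer 'for lab_type, loinc_codes in LAB_LOINC.items(): …'
def matchLoincLoop (table : List (String × List String)) (codes : List String) : Option String :=
  match table with
  | [] => none
  | (labType, loincCodes) :: rest =>
    if anyCodeIn codes loincCodes then some labType else matchLoincLoop rest codes

def match_lab_type (codes : List String) (display : Option String) : Option String :=
  match matchLoincLoop labLoinc codes with
  | some labType => some labType
  | none =>
    -- display.lower() if display else ""  (None and "" are falsy)
    let displayLower : String :=
      match display with
      | some s => if s ≠ "" then PySem.Str.lower s else ""
      | none => ""
    if PySem.Str.isIn "inr" displayLower then some "inr"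
    else if PySem.Str.isIn "d-dimer" displayLower || PySem.Str.isIn "ddimer" displayLower
            || PySem.Str.isIn "d dimer" displayLower then some "ddimer"
    else if PySem.Str.isIn "troponin" displayLower then some "troponin"
    else if PySem.Str.isIn "bnp" displayLower || PySem.Str.isIn "natriuretic" displayLower then some "bnp"
    else if PySem.Str.isIn "creatinine" displayLower then some "creatinine"
    else none

-- ===== PORT B =====
-- reverse index {code: lab_type for lab_type, codes in LAB_LOINC.items() for code in codes}
def codeToType : PySem.Dict String String :=
  PySem.Dict.ofList
    [("6301-6", "inr"), ("34714-6", "inr"), ("46418-0", "inr"),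
     ("48066-5", "ddimer"), ("48065-7", "ddimer"), ("48067-3", "ddimer"),
     ("3246-6", "ddimer"), ("48058-2", "ddimer"),
     ("6598-7", "troponin"), ("10839-9", "troponin"), ("49563-0", "troponin"),
     ("89579-7", "troponin"),
     ("30934-4", "bnp"), ("33762-6", "bnp"),
     ("2160-0", "creatinine"), ("38483-4", "creatinine")]

def keywordTable : List (String × String) :=
  [("inr", "inr"), ("d-dimer", "ddimer"), ("ddimer", "ddimer"), ("d dimer", "ddimer"),
   ("troponin", "troponin"), ("bnp", "bnp"), ("natriuretic", "bnp"),
   ("creatinine", "creatinine")]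

def labPriority : List String := ["inr", "ddimer", "troponin", "bnp", "creatinine"]

-- 'for lab_type in LAB_LOINC: if lab_type in hits: return lab_type'
def firstHit (prio : List String) (hits : PySem.Set String) : Option String :=
  match prio with
  | [] => none
  | labType :: rest => if PySem.Set.contains hits labType then some labType else firstHit rest hits

-- 'for kw, lab_type in _KEYWORDS: if kw in text: return lab_type'
def firstKeyword (table : List (String × String)) (text : String) : Option String :=
  match table with
  | [] => none
  | (kw, labType) :: rest => if PySem.Str.isIn kw text then some labType else firstKeyword rest text

def match_lab_type_alt (codes : List String) (display : Option String) : Option String :=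
  -- hits = {_CODE_TO_TYPE[c] for c in codes if c in _CODE_TO_TYPE}
  let hits : PySem.Set String :=
    codes.foldl (fun s c =>
      match codeToType.get? c with
      | some t => PySem.Set.add s t
      | none => s) PySem.Set.empty
  match firstHit labPriority hits with
  | some labType => some labType
  | none =>
    let text : String :=
      match display with
      | some s => if s ≠ "" then PySem.Str.lower s else ""
      | none => ""
    firstKeyword keywordTable text

-- ===== PRECONDITION & SPEC =====
def Spec_match_lab_type (codes : List String) (display : Option String) (out : Option String) : Prop := out = match_lab_type_alt codes display
instance (codes : List String) (display : Option String) (out : Option String) : Decidable (Spec_match_lab_type codes display out) := by unfold Spec_match_lab_type; infer_instance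

-- ===== CLAIM (what is proved, stated in full; the proofs are below) =====
def Claim_equal_match_lab_type : Prop := ∀ (codes : List String) (display : Option String), Dom_match_lab_type codes display → Spec_match_lab_type codes display (match_lab_type codes display)

-- ===== LEMMAS AND PROOFS =====

-- membership in the accumulated hit set = some input code maps to t through the reverse index
theorem contains_hits (codes : List String) (s : PySem.Set String) (t : String) :
    PySem.Set.contains
      (codes.foldl (fun s c =>
        match codeToType.get? c with
        | some t' => PySem.Set.add s t'
        | none => s) s) t
    = (PySem.Set.contains s t || codes.any (fun c => codeToType.get? c == some t)) := by
  induction codes generalizing s with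
  | nil => simp
  | cons c cs ih =>
    have hadd : ∀ (s : PySem.Set String) (t t' : String),
        PySem.Set.contains (PySem.Set.add s t') t = (t == t' || PySem.Set.contains s t) := by
      intro s t t'
      simp only [PySem.Set.add, PySem.Set.contains]
      by_cases hm : t' ∈ s
      · by_cases ht : t = t' <;> simp [hm, ht]
      · by_cases ht : t = t' <;> simp [hm, ht]
    simp only [List.foldl_cons, List.any_cons, ih]
    cases h : codeToType.get? c with
    | none => simp
    | some t' =>
      rw [hadd]
      simp [Bool.or_left_comm, Bool.or_assoc, BEq.comm]

theorem hits_contains (codes : List String) (t : String) :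
    PySem.Set.contains
      (codes.foldl (fun s c =>
        match codeToType.get? c with
        | some t' => PySem.Set.add s t'
        | none => s) PySem.Set.empty) t
    = codes.any (fun c => codeToType.get? c == some t) := by
  rw [contains_hits]
  simp [PySem.Set.empty, PySem.Set.contains]

-- first-match lookup on an association list with distinct keys is membership of the pair
theorem get?_mk_some_iff (l : List (String × String)) (c t : String)
    (h : (l.map Prod.fst).Nodup) :
    (PySem.Dict.mk l).get? c = some t ↔ (c, t) ∈ l := by
  induction l with
  | nil => simp [PySem.Dict.get?]
  | cons p rest ih =>
    obtain ⟨k, v⟩ := p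
    simp only [List.map_cons, List.nodup_cons, List.mem_map] at h
    obtain ⟨hk, hrest⟩ := h
    rw [PySem.Dict.get?_mk_cons]
    by_cases hc : k = c
    · subst hc
      simp only [beq_self_eq_true, if_true, Option.some.injEq, List.mem_cons,
        Prod.mk.injEq, true_and]
      constructor
      · intro hv; exact Or.inl hv.symm
      · rintro (hv | hmem)
        · exact hv.symm
        · exact absurd ⟨(k, t), hmem, rfl⟩ hk
    · have hkc : (k == c) = false := by simp [hc]
      simp only [hkc, Bool.false_eq_true, if_false, ih hrest, List.mem_cons, Prod.mk.injEq]
      constructor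
      · exact Or.inr
      · rintro (⟨hck, -⟩ | hmem)
        · exact absurd hck.symm hc
        · exact hmem

theorem codeToType_mk : codeToType = PySem.Dict.mk
    [("6301-6", "inr"), ("34714-6", "inr"), ("46418-0", "inr"),
     ("48066-5", "ddimer"), ("48065-7", "ddimer"), ("48067-3", "ddimer"),
     ("3246-6", "ddimer"), ("48058-2", "ddimer"),
     ("6598-7", "troponin"), ("10839-9", "troponin"), ("49563-0", "troponin"),
     ("89579-7", "troponin"),
     ("30934-4", "bnp"), ("33762-6", "bnp"),
     ("2160-0", "creatinine"), ("38483-4", "creatinine")] := rfl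

theorem codeToType_keys_nodup :
    (([("6301-6", "inr"), ("34714-6", "inr"), ("46418-0", "inr"),
     ("48066-5", "ddimer"), ("48065-7", "ddimer"), ("48067-3", "ddimer"),
     ("3246-6", "ddimer"), ("48058-2", "ddimer"),
     ("6598-7", "troponin"), ("10839-9", "troponin"), ("49563-0", "troponin"),
     ("89579-7", "troponin"),
     ("30934-4", "bnp"), ("33762-6", "bnp"),
     ("2160-0", "creatinine"), ("38483-4", "creatinine")] : List (String × String)).map Prod.fst).Nodup := by
  simp

theorem lookup_inr (c : String) :
    (codeToType.get? c == some "inr") = (["6301-6", "34714-6", "46418-0"] : List String).contains c := by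
  rw [codeToType_mk, Bool.eq_iff_iff, beq_iff_eq,
    get?_mk_some_iff _ _ _ codeToType_keys_nodup]
  simp

theorem lookup_ddimer (c : String) :
    (codeToType.get? c == some "ddimer") = (["48066-5", "48065-7", "48067-3", "3246-6", "48058-2"] : List String).contains c := by
  rw [codeToType_mk, Bool.eq_iff_iff, beq_iff_eq,
    get?_mk_some_iff _ _ _ codeToType_keys_nodup]
  simp

theorem lookup_troponin (c : String) :
    (codeToType.get? c == some "troponin") = (["6598-7", "10839-9", "49563-0", "89579-7"] : List String).contains c := by
  rw [codeToType_mk, Bool.eq_iff_iff, beq_iff_eq,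
    get?_mk_some_iff _ _ _ codeToType_keys_nodup]
  simp

theorem lookup_bnp (c : String) :
    (codeToType.get? c == some "bnp") = (["30934-4", "33762-6"] : List String).contains c := by
  rw [codeToType_mk, Bool.eq_iff_iff, beq_iff_eq,
    get?_mk_some_iff _ _ _ codeToType_keys_nodup]
  simp

theorem lookup_creatinine (c : String) :
    (codeToType.get? c == some "creatinine") = (["2160-0", "38483-4"] : List String).contains c := by
  rw [codeToType_mk, Bool.eq_iff_iff, beq_iff_eq,
    get?_mk_some_iff _ _ _ codeToType_keys_nodup]
  simp

theorem anyCodeIn_eq_any (codes ls : List String) :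
    anyCodeIn codes ls = codes.any (fun c => ls.contains c) := by
  induction codes with
  | nil => rfl
  | cons c rest ih =>
    simp only [anyCodeIn, List.any_cons, ih]
    cases ls.contains c <;> simp

theorem iteOrSplit (a b : Bool) (x y : Option String) :
    (if (a || b) = true then x else y) = if a = true then x else if b = true then x else y := by
  cases a <;> cases b <;> simp

theorem fallback_eq (dl : String) :
    (if PySem.Str.isIn "inr" dl then some "inr"
     else if PySem.Str.isIn "d-dimer" dl || PySem.Str.isIn "ddimer" dl
             || PySem.Str.isIn "d dimer" dl then some "ddimer"
     else if PySem.Str.isIn "troponin" dl then some "troponin"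
     else if PySem.Str.isIn "bnp" dl || PySem.Str.isIn "natriuretic" dl then some "bnp"
     else if PySem.Str.isIn "creatinine" dl then some "creatinine"
     else none)
    = firstKeyword keywordTable dl := by
  simp only [firstKeyword, keywordTable, iteOrSplit]

theorem code_phase_eq (codes : List String) :
    firstHit labPriority
      (codes.foldl (fun s c =>
        match codeToType.get? c with
        | some t => PySem.Set.add s t
        | none => s) PySem.Set.empty)
    = matchLoincLoop labLoinc codes := by
  simp only [firstHit, labPriority, hits_contains, lookup_inr, lookup_ddimer,
    lookup_troponin, lookup_bnp, lookup_creatinine, matchLoincLoop, labLoinc,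
    anyCodeIn_eq_any]

-- ===== VERDICT (by name: the statement is the Claim_ definition above) =====
theorem match_lab_type_spec : Claim_equal_match_lab_type := by
  unfold Claim_equal_match_lab_type
  intro codes display _
  unfold Spec_match_lab_type match_lab_type match_lab_type_alt
  simp only [code_phase_eq]
  cases hm : matchLoincLoop labLoinc codes with
  | some t => rfl
  | none => exact fallback_eq _
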